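-- pv_equiv track=rewrite | github.com/jurevreca12/obi | sim/test_obi_crossbar.py | request_decode
-- ===== SOURCE A (Python) =====
-- def request_decode(address: int) -> str:
--     decode_dict = {
--         (int("0000_0000", 16), int("4000_0000", 16)) : "0",
--         (int("4000_0000", 16), int("4000_0000", 16)) : "1"
--     }
--     for base, mask in list(decode_dict.keys()):
--         if ((base & mask) == (address & mask) ):
--             slave_id = decode_dict[(base, mask)]
--     return slave_id
-- ===== SOURCE B (Python) =====
-- def request_decode(address: int) -> str:
--     # the two decode entries share mask 0x4000_0000; decoding is just that one bit
--     return "1" if (address & 0x4000_0000) else "0"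
-- ===== Notes on version B (the rewrite author's own statement) =====
-- stated objective: simpler
-- what changed: Replaces the dict construction and the loop over its keys by a direct test of the single mask bit 0x40000000, which both entries share.
import Mathlib
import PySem

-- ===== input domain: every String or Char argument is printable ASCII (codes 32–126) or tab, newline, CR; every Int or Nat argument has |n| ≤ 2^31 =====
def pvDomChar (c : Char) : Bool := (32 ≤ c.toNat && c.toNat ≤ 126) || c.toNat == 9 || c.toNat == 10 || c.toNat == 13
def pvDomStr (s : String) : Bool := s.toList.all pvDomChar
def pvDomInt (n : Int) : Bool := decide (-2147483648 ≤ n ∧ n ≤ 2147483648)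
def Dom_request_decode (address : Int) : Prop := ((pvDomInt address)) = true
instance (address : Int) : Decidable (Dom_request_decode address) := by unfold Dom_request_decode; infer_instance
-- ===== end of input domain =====

-- B replaces A's dict construction and key loop by a direct test of the single shared mask bit (objective: simpler).


-- ===== PORT A =====
-- Literal port of A: build the 2-entry dict, loop over its keys updating `slave_id`
-- (an Option, `none` = the Python name still unbound), look the matching key up in the dict.
-- The final `.getD ""` is the (provably unreachable) unbound-name case: one key always matches.
def request_decode (address : Int) : String :=
  let decode_dict : PySem.Dict (Int × Int) String :=
    PySem.Dict.ofList [((0, 1073741824), "0"), ((1073741824, 1073741824), "1")]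
  let slave_id : Option String :=
    decode_dict.keys.foldl
      (fun acc bm =>
        if PySem.Int.band bm.1 bm.2 == PySem.Int.band address bm.2 then
          decode_dict.get? bm
        else acc)
      none
  slave_id.getD ""

-- ===== PORT B =====
def request_decode_alt (address : Int) : String :=
  if PySem.Int.band address 1073741824 ≠ 0 then "1" else "0"

-- ===== PRECONDITION & SPEC =====
def Spec_request_decode (address : Int) (out : String) : Prop := out = request_decode_alt address
instance (address : Int) (out : String) : Decidable (Spec_request_decode address out) := by unfold Spec_request_decode; infer_instance

-- ===== CLAIM (what is proved, stated in full; the proofs are below) =====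
def Claim_equal_request_decode : Prop := ∀ (address : Int), Dom_request_decode address → Spec_request_decode address (request_decode address)

-- ===== LEMMAS AND PROOFS =====

-- a & 0x40000000 is either 0 or 0x40000000 (Python two's-complement `&`, any sign of a)
lemma band_bit30_dichotomy (a : Int) :
    PySem.Int.band a 1073741824 = 0 ∨ PySem.Int.band a 1073741824 = 1073741824 := by
  unfold PySem.Int.band
  have hm : (1073741824 : Int).toNat = 2 ^ 30 := by decide
  by_cases ha : 0 ≤ a
  · rw [if_pos ha, if_pos (by norm_num : (0:Int) ≤ 1073741824), hm, Nat.and_two_pow]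
    cases hb : a.toNat.testBit 30 <;> norm_num
  · rw [if_neg ha, if_pos (by norm_num : (0:Int) ≤ 1073741824), hm, Nat.two_pow_and]
    cases hb : (-a - 1).toNat.testBit 30 <;> norm_num
-- ===== VERDICT (by name: the statement is the Claim_ definition above) =====
theorem request_decode_spec : Claim_equal_request_decode := by
  intro address _
  unfold Spec_request_decode request_decode request_decode_alt
  have k1 : PySem.Int.band 0 1073741824 = 0 := by decide
  rcases band_bit30_dichotomy address with h | h <;>
    simp [PySem.Dict.ofList, PySem.Dict.keys, PySem.Dict.empty, PySem.Dict.update,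
          PySem.Dict.get?, PySem.Dict.insert, PySem.Dict.contains, List.foldl, List.find?, k1, h]
  decide
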